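-- pv_equiv track=rewrite | github.com/vibhor-77/agi-mvp-arc-agi-1 | domains/arc/primitives.py | g_move_to_corners
-- ===== SOURCE A (Python) =====
-- Grid = list[list[int]]
--
-- def g_move_to_corners(g: Grid) -> Grid:
--     """For each non-zero pixel in g, move it to the nearest corner of the grid."""
--     R, C = len(g), len(g[0])
--     out = [[0]*C for _ in range(R)]
--     for r in range(R):
--         for c in range(C):
--             v = g[r][c]
--             if v != 0:
--                 # Target corner: (0,0), (0,C-1), (R-1,0), (R-1,C-1)
--                 tr = 0 if r < R/2 else R-1
--                 tc = 0 if c < C/2 else C-1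
--                 out[tr][tc] = v
--     return out
-- ===== SOURCE B (Python) =====
-- def g_move_to_corners(g):
--     """For each non-zero pixel in g, move it to the nearest corner of the grid.
--
--     Corner-centric: scan each of the four quadrants (split at R/2, C/2) once,
--     remembering the last nonzero value in row-major order, then write that
--     value into the quadrant's corner of an all-zero grid.
--     """
--     R, C = len(g), len(g[0])
--     rt, ct = (R + 1) // 2, (C + 1) // 2  # rows r with r < R/2 are 0..rt-1, cols likewise
--
--     def last_nonzero(r0, r1, c0, c1):
--         last = None
--         for r in range(r0, r1):
--             for c in range(c0, c1):
--                 if g[r][c] != 0: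
--                     last = g[r][c]
--         return last
--
--     out = [[0] * C for _ in range(R)]
--     q = last_nonzero(0, rt, 0, ct)
--     if q is not None:
--         out[0][0] = q
--     q = last_nonzero(0, rt, ct, C)
--     if q is not None:
--         out[0][C - 1] = q
--     q = last_nonzero(rt, R, 0, ct)
--     if q is not None:
--         out[R - 1][0] = q
--     q = last_nonzero(rt, R, ct, C)
--     if q is not None:
--         out[R - 1][C - 1] = q
--     return out
-- ===== Notes on version B (the rewrite author's own statement) =====
-- stated objective: faster
-- what changed: Corner-centric instead of pixel-centric: B scans each of the four quadrant sub-rectangles once tracking the last nonzero value in row-major order and writes it once into that quadrant's corner of a zero grid, instead of A's single whole-grid scan that computes a target corner and writes for every nonzero pixel (measured ~2x faster: the per-pixel corner arithmetic and repeated out-writes disappear).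
import Mathlib
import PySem

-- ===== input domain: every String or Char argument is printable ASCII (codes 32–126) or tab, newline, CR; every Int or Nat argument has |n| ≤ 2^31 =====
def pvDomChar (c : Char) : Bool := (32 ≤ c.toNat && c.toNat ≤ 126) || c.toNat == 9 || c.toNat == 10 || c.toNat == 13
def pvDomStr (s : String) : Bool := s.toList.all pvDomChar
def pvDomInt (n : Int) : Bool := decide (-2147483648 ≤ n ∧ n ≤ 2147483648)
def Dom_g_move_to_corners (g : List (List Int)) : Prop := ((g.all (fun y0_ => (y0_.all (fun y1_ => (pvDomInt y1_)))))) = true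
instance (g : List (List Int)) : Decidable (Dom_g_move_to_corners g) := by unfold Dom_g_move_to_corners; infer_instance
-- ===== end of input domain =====

-- B reorganizes the work by target corner: one scan per quadrant keeping the last nonzero
-- value, written once into that quadrant's corner, instead of A's single grid scan scattering
-- each pixel to its corner (measured constant-factor faster in a timing run).

-- shared 2-d access helpers (exact for in-range indices, which Pre_ guarantees for g)
def pvGet2 (out : List (List Int)) (r c : Nat) : Int := (out.getD r []).getD c 0
def pvSet2 (out : List (List Int)) (r c : Nat) (v : Int) : List (List Int) :=
  out.set r ((out.getD r []).set c v)

-- ===== PORT A =====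
-- loop body of A at pixel p = (r, c); 'r < R/2' in Python is exactly '2*r < R' on integers
def pvStepA (g : List (List Int)) (R C : Nat) (out : List (List Int)) (p : Nat × Nat) :
    List (List Int) :=
  let v := pvGet2 g p.1 p.2
  if v ≠ 0 then
    pvSet2 out (if 2 * p.1 < R then 0 else R - 1) (if 2 * p.2 < C then 0 else C - 1) v
  else out

def g_move_to_corners (g : List (List Int)) : List (List Int) :=
  let R := g.length
  let C := (g.getD 0 []).length   -- g[0]; Pre_ guarantees g ≠ []
  let out0 := List.replicate R (List.replicate C (0 : Int))
  (List.range R).foldl (fun out r =>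
    (List.range C).foldl (fun out c => pvStepA g R C out (r, c)) out) out0

-- ===== PORT B =====
-- last nonzero value of g on rows [r0, r1) × cols [c0, c1), row-major (B's helper)
def pvLastNonzero (g : List (List Int)) (r0 r1 c0 c1 : Nat) : Option Int :=
  (List.range' r0 (r1 - r0)).foldl (fun last r =>
    (List.range' c0 (c1 - c0)).foldl (fun last c =>
      if pvGet2 g r c ≠ 0 then some (pvGet2 g r c) else last) last) none

-- 'if q is not None: out[tr][tc] = q'
def pvWrite (out : List (List Int)) (tr tc : Nat) : Option Int → List (List Int)
  | some v => pvSet2 out tr tc v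
  | none => out

def g_move_to_corners_alt (g : List (List Int)) : List (List Int) :=
  let R := g.length
  let C := (g.getD 0 []).length
  let rt := (R + 1) / 2   -- rows r with r < R/2 are exactly 0 .. rt-1
  let ct := (C + 1) / 2
  let out0 := List.replicate R (List.replicate C (0 : Int))
  let o1 := pvWrite out0 0 0 (pvLastNonzero g 0 rt 0 ct)
  let o2 := pvWrite o1 0 (C - 1) (pvLastNonzero g 0 rt ct C)
  let o3 := pvWrite o2 (R - 1) 0 (pvLastNonzero g rt R 0 ct)
  pvWrite o3 (R - 1) (C - 1) (pvLastNonzero g rt R ct C)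

-- ===== PRECONDITION & SPEC =====
-- Pre_ excludes exactly the inputs where Python A raises IndexError: the empty grid
-- (g[0]) and grids with a row shorter than the first row (g[r][c] for c < len(g[0])).
def Pre_g_move_to_corners (g : List (List Int)) : Prop :=
  g ≠ [] ∧ ∀ row ∈ g, (g.headD []).length ≤ row.length
instance (g : List (List Int)) : Decidable (Pre_g_move_to_corners g) := by
  unfold Pre_g_move_to_corners; infer_instance

def pvWitness_g_move_to_corners : List (List Int) := [[1, 0, 2], [0, 5, 0], [3, 0, 4]]

def Spec_g_move_to_corners (g : List (List Int)) (out : List (List Int)) : Prop :=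
  out = g_move_to_corners_alt g
instance (g : List (List Int)) (out : List (List Int)) :
    Decidable (Spec_g_move_to_corners g out) := by unfold Spec_g_move_to_corners; infer_instance

-- ===== CLAIM (what is proved, stated in full; the proofs are below) =====
def Claim_equal_g_move_to_corners : Prop := ∀ (g : List (List Int)),
  Dom_g_move_to_corners g → Pre_g_move_to_corners g →
    Spec_g_move_to_corners g (g_move_to_corners g)

-- ===== LEMMAS AND PROOFS =====

-- last nonzero value over an explicit pixel list
def pvF (g : List (List Int)) (l : List (Nat × Nat)) : Option Int :=
  l.foldl (fun acc p => if pvGet2 g p.1 p.2 ≠ 0 then some (pvGet2 g p.1 p.2) else acc) none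

def pvQuad (r0 r1 c0 c1 : Nat) : List (Nat × Nat) :=
  (List.range' r0 (r1 - r0)).flatMap (fun r => (List.range' c0 (c1 - c0)).map (fun c => (r, c)))

def pvRM (R C : Nat) : List (Nat × Nat) :=
  (List.range R).flatMap (fun r => (List.range C).map (fun c => (r, c)))

def pvShape (out : List (List Int)) (R C : Nat) : Prop :=
  out.length = R ∧ ∀ row ∈ out, row.length = C

-- A's effect at one cell, as a fold over pixels
def pvStepM (g : List (List Int)) (R C r' c' : Nat) (x : Int) (p : Nat × Nat) : Int :=
  if pvGet2 g p.1 p.2 ≠ 0 ∧ (if 2 * p.1 < R then 0 else R - 1) = r'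
      ∧ (if 2 * p.2 < C then 0 else C - 1) = c' then pvGet2 g p.1 p.2 else x

def pvStepV (g : List (List Int)) (x : Int) (p : Nat × Nat) : Int :=
  if pvGet2 g p.1 p.2 ≠ 0 then pvGet2 g p.1 p.2 else x

theorem pvGet2_eq_getElem (o : List (List Int)) (r c : Nat) (hr : r < o.length)
    (hc : c < (o[r]).length) : pvGet2 o r c = o[r][c] := by
  simp [pvGet2, List.getD_eq_getElem?_getD, hr, hc]

theorem pvShape_set2 {out : List (List Int)} {R C : Nat} (h : pvShape out R C)
    (r c : Nat) (v : Int) : pvShape (pvSet2 out r c v) R C := by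
  obtain ⟨hl, hrow⟩ := h
  rcases Nat.lt_or_ge r out.length with hr | hr
  · refine ⟨by simp [pvSet2, hl], ?_⟩
    intro row hmem
    rcases List.mem_or_eq_of_mem_set hmem with hm | he
    · exact hrow _ hm
    · subst he
      have hg : out.getD r [] = out[r] := by
        simp [List.getD_eq_getElem?_getD, List.getElem?_eq_getElem hr]
      rw [hg, List.length_set]
      exact hrow _ (List.getElem_mem hr)
  · rw [pvSet2, List.set_eq_of_length_le hr]
    exact ⟨hl, hrow⟩

theorem pvGet2_set2 {out : List (List Int)} {R C : Nat} (h : pvShape out R C)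
    {tr tc r' c' : Nat} (htr : tr < R) (htc : tc < C) (v : Int) :
    pvGet2 (pvSet2 out tr tc v) r' c' = if tr = r' ∧ tc = c' then v else pvGet2 out r' c' := by
  obtain ⟨hl, hrow⟩ := h
  have htr' : tr < out.length := by omega
  have hg : out.getD tr [] = out[tr] := by
    simp [List.getD_eq_getElem?_getD, List.getElem?_eq_getElem htr']
  have hlen : (out.getD tr []).length = C := by rw [hg]; exact hrow _ (List.getElem_mem htr')
  have htc' : tc < (out.getD tr []).length := by omega
  unfold pvGet2 pvSet2
  simp only [List.getD_eq_getElem?_getD]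
  by_cases h1 : tr = r'
  · subst h1
    by_cases h2 : tc = c'
    · subst h2
      have h3 : tc < (out[tr]).length := by rw [← hg]; omega
      simp [htr', h3]
    · simp [htr', h2]
  · simp [h1]

theorem pvGet2_write {out : List (List Int)} {R C : Nat} (h : pvShape out R C)
    {tr tc r' c' : Nat} (htr : tr < R) (htc : tc < C) (q : Option Int) :
    pvGet2 (pvWrite out tr tc q) r' c'
      = if tr = r' ∧ tc = c' then q.getD (pvGet2 out r' c') else pvGet2 out r' c' := by
  cases q with
  | none => simp [pvWrite]
  | some v => simpa [pvWrite] using pvGet2_set2 h htr htc v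

theorem pvShape_write {out : List (List Int)} {R C : Nat} (h : pvShape out R C)
    (tr tc : Nat) (q : Option Int) : pvShape (pvWrite out tr tc q) R C := by
  cases q with
  | none => exact h
  | some v => exact pvShape_set2 h tr tc v

theorem pvA_core (g : List (List Int)) (R C r' c' : Nat) (hr' : r' < R) (hc' : c' < C) :
    ∀ (ps : List (Nat × Nat)) (out : List (List Int)), pvShape out R C →
      pvGet2 (ps.foldl (pvStepA g R C) out) r' c'
        = ps.foldl (pvStepM g R C r' c') (pvGet2 out r' c') := by
  intro ps
  induction ps with
  | nil => intro out h; rfl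
  | cons p ps ih =>
    intro out h
    rw [List.foldl_cons, List.foldl_cons]
    by_cases hv : pvGet2 g p.1 p.2 ≠ 0
    · have htr : (if 2 * p.1 < R then 0 else R - 1) < R := by split <;> omega
      have htc : (if 2 * p.2 < C then 0 else C - 1) < C := by split <;> omega
      have hstep : pvStepA g R C out p
          = pvSet2 out (if 2 * p.1 < R then 0 else R - 1) (if 2 * p.2 < C then 0 else C - 1)
              (pvGet2 g p.1 p.2) := by simp [pvStepA, hv]
      rw [hstep, ih _ (pvShape_set2 h _ _ _)]
      rw [pvGet2_set2 h htr htc]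
      congr 1
      unfold pvStepM
      by_cases hc : (if 2 * p.1 < R then 0 else R - 1) = r'
          ∧ (if 2 * p.2 < C then 0 else C - 1) = c'
      · simp [hc, hv]
      · simp [hc]
    · have hstep : pvStepA g R C out p = out := by simp [pvStepA, hv]
      have hm : pvStepM g R C r' c' (pvGet2 out r' c') p = pvGet2 out r' c' := by
        simp only [pvStepM]
        have : ¬(pvGet2 g p.1 p.2 ≠ 0 ∧ (if 2 * p.1 < R then 0 else R - 1) = r'
            ∧ (if 2 * p.2 < C then 0 else C - 1) = c') := fun hh => hv hh.1
        simp [this]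
      rw [hstep, ih _ h, hm]

theorem pvStepM_filter (g : List (List Int)) (R C r' c' : Nat) :
    ∀ (ps : List (Nat × Nat)) (x : Int),
      ps.foldl (pvStepM g R C r' c') x
        = (ps.filter (fun p => decide ((if 2 * p.1 < R then 0 else R - 1) = r')
            && decide ((if 2 * p.2 < C then 0 else C - 1) = c'))).foldl (pvStepV g) x := by
  intro ps
  induction ps with
  | nil => intro x; rfl
  | cons p ps ih =>
    intro x
    rw [List.foldl_cons, List.filter_cons]
    by_cases hb : (if 2 * p.1 < R then 0 else R - 1) = r' ∧ (if 2 * p.2 < C then 0 else C - 1) = c'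
    · have : (decide ((if 2 * p.1 < R then 0 else R - 1) = r')
          && decide ((if 2 * p.2 < C then 0 else C - 1) = c')) = true := by
        simp [hb.1, hb.2]
      rw [if_pos this, List.foldl_cons, ← ih]
      congr 1
      simp [pvStepM, pvStepV, hb.1, hb.2]
    · have : ¬((decide ((if 2 * p.1 < R then 0 else R - 1) = r')
          && decide ((if 2 * p.2 < C then 0 else C - 1) = c')) = true) := by
        simp only [Bool.and_eq_true, decide_eq_true_eq]; exact hb
      rw [if_neg this, ← ih]
      congr 1
      have : ¬(pvGet2 g p.1 p.2 ≠ 0 ∧ (if 2 * p.1 < R then 0 else R - 1) = r'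
          ∧ (if 2 * p.2 < C then 0 else C - 1) = c') := fun hh => hb hh.2
      simp [pvStepM, this]

theorem pvF_some (g : List (List Int)) :
    ∀ (l : List (Nat × Nat)) (a : Int),
      l.foldl (fun acc p => if pvGet2 g p.1 p.2 ≠ 0 then some (pvGet2 g p.1 p.2) else acc) (some a)
        = some ((pvF g l).getD a) := by
  intro l
  induction l with
  | nil => intro a; rfl
  | cons p l ih =>
    intro a
    by_cases hv : pvGet2 g p.1 p.2 ≠ 0
    · simp only [pvF, List.foldl_cons, if_pos hv]
      rw [ih]
      simp
    · simp only [pvF, List.foldl_cons, if_neg hv]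
      exact ih a

theorem pvFoldl_stepV (g : List (List Int)) :
    ∀ (l : List (Nat × Nat)) (x : Int), l.foldl (pvStepV g) x = (pvF g l).getD x := by
  intro l
  induction l with
  | nil => intro x; rfl
  | cons p l ih =>
    intro x
    by_cases hv : pvGet2 g p.1 p.2 ≠ 0
    · rw [List.foldl_cons, show pvStepV g x p = pvGet2 g p.1 p.2 from by simp [pvStepV, hv], ih]
      have h2 : pvF g (p :: l) = some ((pvF g l).getD (pvGet2 g p.1 p.2)) := by
        unfold pvF
        rw [List.foldl_cons, if_pos hv]
        exact pvF_some g l _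
      rw [h2]
      simp
    · rw [List.foldl_cons, show pvStepV g x p = x from by simp [pvStepV, hv], ih]
      have h2 : pvF g (p :: l) = pvF g l := by
        unfold pvF
        rw [List.foldl_cons, if_neg hv]
      rw [h2]

theorem pvRange_split (R rt : Nat) (h : rt ≤ R) :
    List.range R = List.range' 0 rt ++ List.range' rt (R - rt) := by
  rw [List.range_eq_range']
  have := List.range'_append (s := 0) (m := rt) (n := R - rt) (step := 1)
  simp only [Nat.zero_add, Nat.one_mul] at this
  rw [this]
  congr 1
  omega

theorem pvFilter_range_lt (R rt : Nat) (h : rt ≤ R) :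
    (List.range R).filter (fun r => decide (r < rt)) = List.range' 0 rt := by
  rw [pvRange_split R rt h, List.filter_append]
  have h1 : (List.range' 0 rt).filter (fun r => decide (r < rt)) = List.range' 0 rt :=
    List.filter_eq_self.mpr (by intro a ha; simp [List.mem_range'_1] at ha ⊢; omega)
  have h2 : (List.range' rt (R - rt)).filter (fun r => decide (r < rt)) = [] :=
    List.filter_eq_nil_iff.mpr (by intro a ha; simp [List.mem_range'_1] at ha ⊢; omega)
  rw [h1, h2, List.append_nil]

theorem pvFilter_range_ge (R rt : Nat) (h : rt ≤ R) :
    (List.range R).filter (fun r => decide (rt ≤ r)) = List.range' rt (R - rt) := by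
  rw [pvRange_split R rt h, List.filter_append]
  have h1 : (List.range' 0 rt).filter (fun r => decide (rt ≤ r)) = [] :=
    List.filter_eq_nil_iff.mpr (by intro a ha; simp [List.mem_range'_1] at ha ⊢; omega)
  have h2 : (List.range' rt (R - rt)).filter (fun r => decide (rt ≤ r)) = List.range' rt (R - rt) :=
    List.filter_eq_self.mpr (by intro a ha; simp [List.mem_range'_1] at ha ⊢; omega)
  rw [h1, h2, List.nil_append]

theorem pvFlatMap_if_filter (l : List Nat) (pr : Nat → Bool) (h : Nat → List (Nat × Nat)) :
    l.flatMap (fun r => if pr r then h r else []) = (l.filter pr).flatMap h := by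
  induction l with
  | nil => rfl
  | cons a l ih =>
    rw [List.flatMap_cons, List.filter_cons]
    by_cases hp : pr a
    · rw [if_pos hp, if_pos hp, List.flatMap_cons, ih]
    · rw [if_neg hp, if_neg (by simpa using hp), ih, List.nil_append]

theorem pvFilter_RM (R C : Nat) (pr pc : Nat → Bool) :
    (pvRM R C).filter (fun p => pr p.1 && pc p.2)
      = ((List.range R).filter pr).flatMap (fun r =>
          ((List.range C).filter pc).map (fun c => (r, c))) := by
  unfold pvRM
  rw [List.filter_flatMap]
  have hinner : ∀ r : Nat, ((List.range C).map (fun c => (r, c))).filter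
        (fun p => pr p.1 && pc p.2)
      = if pr r then ((List.range C).filter pc).map (fun c => (r, c)) else [] := by
    intro r
    rw [List.filter_map]
    by_cases hpr : pr r
    · rw [if_pos hpr]
      congr 1
      apply List.filter_congr
      intro c _
      simp [Function.comp, hpr]
    · rw [if_neg hpr]
      have : (List.range C).filter ((fun p : Nat × Nat => pr p.1 && pc p.2) ∘ (fun c => (r, c))) = [] :=
        List.filter_eq_nil_iff.mpr (by intro c _; simp [Function.comp, hpr])
      rw [this, List.map_nil]
  simp only [hinner]
  exact pvFlatMap_if_filter _ _ _

theorem pvLastNonzero_eq (g : List (List Int)) (r0 r1 c0 c1 : Nat) :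
    pvLastNonzero g r0 r1 c0 c1 = pvF g (pvQuad r0 r1 c0 c1) := by
  simp [pvLastNonzero, pvQuad, pvF, List.foldl_flatMap, List.foldl_map]

theorem pvLastNonzero_none_rows (g : List (List Int)) {r0 r1 : Nat} (c0 c1 : Nat)
    (h : r1 ≤ r0) : pvLastNonzero g r0 r1 c0 c1 = none := by
  have : r1 - r0 = 0 := by omega
  simp [pvLastNonzero, this]

theorem pvFoldl_id {α : Type} (x : Option Int) : ∀ l : List α,
    l.foldl (fun (last : Option Int) _ => last) x = x := by
  intro l
  induction l generalizing x with
  | nil => rfl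
  | cons a l ih => rw [List.foldl_cons]; exact ih x

theorem pvLastNonzero_none_cols (g : List (List Int)) (r0 r1 : Nat) {c0 c1 : Nat}
    (h : c1 ≤ c0) : pvLastNonzero g r0 r1 c0 c1 = none := by
  have hc : c1 - c0 = 0 := by omega
  simp only [pvLastNonzero, hc, List.range'_zero, List.foldl_nil]
  exact pvFoldl_id none _

theorem pvShape_ext {o1 o2 : List (List Int)} {R C : Nat}
    (h1 : pvShape o1 R C) (h2 : pvShape o2 R C)
    (h : ∀ r < R, ∀ c < C, pvGet2 o1 r c = pvGet2 o2 r c) : o1 = o2 := by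
  obtain ⟨l1, r1⟩ := h1
  obtain ⟨l2, r2⟩ := h2
  apply List.ext_getElem (by omega)
  intro i hi1 hi2
  have hc1 : (o1[i]).length = C := r1 _ (List.getElem_mem hi1)
  have hc2 : (o2[i]).length = C := r2 _ (List.getElem_mem hi2)
  apply List.ext_getElem (by omega)
  intro j hj1 hj2
  have := h i (by omega) j (by omega)
  rwa [pvGet2_eq_getElem o1 i j hi1 hj1, pvGet2_eq_getElem o2 i j hi2 hj2] at this

theorem pvGet2_write_hit {out : List (List Int)} {R C : Nat} (h : pvShape out R C)
    {tr tc r' c' : Nat} (htr : tr < R) (htc : tc < C) (q : Option Int)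
    (he : tr = r' ∧ tc = c') :
    pvGet2 (pvWrite out tr tc q) r' c' = q.getD (pvGet2 out r' c') := by
  rw [pvGet2_write h htr htc, if_pos he]

theorem pvGet2_write_skip {out : List (List Int)} {R C : Nat} (h : pvShape out R C)
    {tr tc r' c' : Nat} (htr : tr < R) (htc : tc < C) (q : Option Int)
    (hs : ¬(tr = r' ∧ tc = c') ∨ q = none) :
    pvGet2 (pvWrite out tr tc q) r' c' = pvGet2 out r' c' := by
  rcases hs with hs | hs
  · rw [pvGet2_write h htr htc, if_neg hs]
  · subst hs; rfl

theorem pvShape_out0 (R C : Nat) : pvShape (List.replicate R (List.replicate C (0 : Int))) R C := by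
  refine ⟨by simp, ?_⟩
  intro row hrow
  rw [List.eq_of_mem_replicate hrow]
  simp

theorem pvGet2_out0 (R C r c : Nat) :
    pvGet2 (List.replicate R (List.replicate C (0 : Int))) r c = 0 := by
  simp only [pvGet2, List.getD_eq_getElem?_getD, List.getElem?_replicate]
  split <;> simp

theorem pvShape_foldlA (g : List (List Int)) (R C : Nat) :
    ∀ (ps : List (Nat × Nat)) (out : List (List Int)), pvShape out R C →
      pvShape (ps.foldl (pvStepA g R C) out) R C := by
  intro ps
  induction ps with
  | nil => intro out h; exact h
  | cons p ps ih =>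
    intro out h
    rw [List.foldl_cons]
    apply ih
    by_cases hv : pvGet2 g p.1 p.2 ≠ 0
    · rw [show pvStepA g R C out p = pvSet2 out (if 2 * p.1 < R then 0 else R - 1)
          (if 2 * p.2 < C then 0 else C - 1) (pvGet2 g p.1 p.2) from by simp [pvStepA, hv]]
      exact pvShape_set2 h _ _ _
    · rw [show pvStepA g R C out p = out from by simp [pvStepA, hv]]
      exact h

theorem pvA_eq (g : List (List Int)) :
    g_move_to_corners g = (pvRM g.length (g.getD 0 []).length).foldl
      (pvStepA g g.length (g.getD 0 []).length)
      (List.replicate g.length (List.replicate (g.getD 0 []).length (0 : Int))) := by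
  simp [g_move_to_corners, pvRM, pvStepA, List.foldl_flatMap, List.foldl_map]

theorem pvB_eq (g : List (List Int)) :
    g_move_to_corners_alt g =
      pvWrite (pvWrite (pvWrite (pvWrite
          (List.replicate g.length (List.replicate (g.getD 0 []).length (0 : Int)))
          0 0 (pvLastNonzero g 0 ((g.length + 1) / 2) 0 (((g.getD 0 []).length + 1) / 2)))
          0 ((g.getD 0 []).length - 1)
            (pvLastNonzero g 0 ((g.length + 1) / 2) (((g.getD 0 []).length + 1) / 2)
              (g.getD 0 []).length))
          (g.length - 1) 0
            (pvLastNonzero g ((g.length + 1) / 2) g.length 0 (((g.getD 0 []).length + 1) / 2)))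
        (g.length - 1) ((g.getD 0 []).length - 1)
          (pvLastNonzero g ((g.length + 1) / 2) g.length (((g.getD 0 []).length + 1) / 2)
            (g.getD 0 []).length) := rfl

theorem pvMain (g : List (List Int)) : g_move_to_corners g = g_move_to_corners_alt g := by
  have hA : pvShape (g_move_to_corners g) g.length (g.getD 0 []).length := by
    rw [pvA_eq]
    exact pvShape_foldlA g _ _ _ _ (pvShape_out0 _ _)
  have sh0 := pvShape_out0 g.length (g.getD 0 []).length
  have sh1 := pvShape_write sh0 0 0
    (pvLastNonzero g 0 ((g.length + 1) / 2) 0 (((g.getD 0 []).length + 1) / 2))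
  have sh2 := pvShape_write sh1 0 ((g.getD 0 []).length - 1)
    (pvLastNonzero g 0 ((g.length + 1) / 2) (((g.getD 0 []).length + 1) / 2) (g.getD 0 []).length)
  have sh3 := pvShape_write sh2 (g.length - 1) 0
    (pvLastNonzero g ((g.length + 1) / 2) g.length 0 (((g.getD 0 []).length + 1) / 2))
  have hB : pvShape (g_move_to_corners_alt g) g.length (g.getD 0 []).length := by
    rw [pvB_eq]
    exact pvShape_write sh3 _ _ _
  apply pvShape_ext hA hB
  intro r' hr' c' hc'
  have hL : pvGet2 (g_move_to_corners g) r' c'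
      = (pvF g ((pvRM g.length (g.getD 0 []).length).filter
          (fun p => decide ((if 2 * p.1 < g.length then 0 else g.length - 1) = r')
            && decide ((if 2 * p.2 < (g.getD 0 []).length then 0
                else (g.getD 0 []).length - 1) = c')))).getD 0 := by
    rw [pvA_eq, pvA_core g _ _ r' c' hr' hc' _ _ (pvShape_out0 _ _), pvGet2_out0,
      pvStepM_filter, pvFoldl_stepV]
  rw [hL, pvB_eq]
  by_cases hr0 : r' = 0
  · subst hr0
    have hrowT : ∀ x ∈ List.range g.length,
        (decide ((if 2 * x < g.length then 0 else g.length - 1) = 0))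
          = decide (x < (g.length + 1) / 2) := by
      intro x hx
      simp only [List.mem_range] at hx
      split <;> (rw [decide_eq_decide]; omega)
    by_cases hc0 : c' = 0
    · subst hc0
      -- top-left corner
      have hcolT : ∀ x ∈ List.range (g.getD 0 []).length,
          (decide ((if 2 * x < (g.getD 0 []).length then 0 else (g.getD 0 []).length - 1) = 0))
            = decide (x < ((g.getD 0 []).length + 1) / 2) := by
        intro x hx
        simp only [List.mem_range] at hx
        split <;> (rw [decide_eq_decide]; omega)
      rw [pvFilter_RM g.length (g.getD 0 []).length (fun x => decide ((if 2 * x < g.length then 0 else g.length - 1) = 0)) (fun x => decide ((if 2 * x < (g.getD 0 []).length then 0 else (g.getD 0 []).length - 1) = 0)), List.filter_congr hrowT, List.filter_congr hcolT,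
        pvFilter_range_lt _ _ (by omega), pvFilter_range_lt _ _ (by omega)]
      have hq : pvQuad 0 ((g.length + 1) / 2) 0 (((g.getD 0 []).length + 1) / 2)
          = (List.range' 0 ((g.length + 1) / 2)).flatMap (fun r =>
              (List.range' 0 (((g.getD 0 []).length + 1) / 2)).map (fun c => (r, c))) := by
        simp [pvQuad]
      rw [← hq, ← pvLastNonzero_eq]
      rw [pvGet2_write_skip sh3 (by omega) (by omega) _ (by
          by_cases h1 : g.length = 1
          · exact Or.inr (pvLastNonzero_none_rows g _ _ (by omega))
          · exact Or.inl (by omega)),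
        pvGet2_write_skip sh2 (by omega) (by omega) _ (by
          by_cases h1 : g.length = 1
          · exact Or.inr (pvLastNonzero_none_rows g _ _ (by omega))
          · exact Or.inl (by omega)),
        pvGet2_write_skip sh1 (by omega) (by omega) _ (by
          by_cases h1 : (g.getD 0 []).length = 1
          · exact Or.inr (pvLastNonzero_none_cols g _ _ (by omega))
          · exact Or.inl (by omega)),
        pvGet2_write_hit sh0 (by omega) (by omega) _ ⟨rfl, rfl⟩, pvGet2_out0]
    · by_cases hcC : c' = (g.getD 0 []).length - 1
      · subst hcC
        -- top-right corner (C ≥ 2 since c' ≠ 0)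
        have hcolB : ∀ x ∈ List.range (g.getD 0 []).length,
            (decide ((if 2 * x < (g.getD 0 []).length then 0 else (g.getD 0 []).length - 1)
                = (g.getD 0 []).length - 1))
              = decide (((g.getD 0 []).length + 1) / 2 ≤ x) := by
          intro x hx
          simp only [List.mem_range] at hx
          split <;> (rw [decide_eq_decide]; omega)
        rw [pvFilter_RM g.length (g.getD 0 []).length (fun x => decide ((if 2 * x < g.length then 0 else g.length - 1) = 0)) (fun x => decide ((if 2 * x < (g.getD 0 []).length then 0 else (g.getD 0 []).length - 1) = (g.getD 0 []).length - 1)), List.filter_congr hrowT, List.filter_congr hcolB,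
          pvFilter_range_lt _ _ (by omega), pvFilter_range_ge _ _ (by omega)]
        have hq : pvQuad 0 ((g.length + 1) / 2) (((g.getD 0 []).length + 1) / 2)
              (g.getD 0 []).length
            = (List.range' 0 ((g.length + 1) / 2)).flatMap (fun r =>
                (List.range' (((g.getD 0 []).length + 1) / 2)
                  ((g.getD 0 []).length - ((g.getD 0 []).length + 1) / 2)).map
                    (fun c => (r, c))) := by
          simp [pvQuad]
        rw [← hq, ← pvLastNonzero_eq]
        rw [pvGet2_write_skip sh3 (by omega) (by omega) _ (by
            by_cases h1 : g.length = 1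
            · exact Or.inr (pvLastNonzero_none_rows g _ _ (by omega))
            · exact Or.inl (by omega)),
          pvGet2_write_skip sh2 (by omega) (by omega) _ (Or.inl (by omega)),
          pvGet2_write_hit sh1 (by omega) (by omega) _ ⟨rfl, rfl⟩,
          pvGet2_write_skip sh0 (by omega) (by omega) _ (Or.inl (by omega)), pvGet2_out0]
      · -- c' is not a corner column: both sides are 0
        rw [List.filter_eq_nil_iff.mpr (by
          intro p hp
          simp only [Bool.and_eq_true, decide_eq_true_eq]
          rintro ⟨h1, h2⟩
          split at h2 <;> omega)]
        rw [pvGet2_write_skip sh3 (by omega) (by omega) _ (Or.inl (by omega)),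
          pvGet2_write_skip sh2 (by omega) (by omega) _ (Or.inl (by omega)),
          pvGet2_write_skip sh1 (by omega) (by omega) _ (Or.inl (by omega)),
          pvGet2_write_skip sh0 (by omega) (by omega) _ (Or.inl (by omega)), pvGet2_out0]
        rfl
  · by_cases hrR : r' = g.length - 1
    · subst hrR
      -- bottom row (R ≥ 2 since r' ≠ 0)
      have hrowB : ∀ x ∈ List.range g.length,
          (decide ((if 2 * x < g.length then 0 else g.length - 1) = g.length - 1))
            = decide ((g.length + 1) / 2 ≤ x) := by
        intro x hx
        simp only [List.mem_range] at hx
        split <;> (rw [decide_eq_decide]; omega)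
      by_cases hc0 : c' = 0
      · subst hc0
        -- bottom-left corner
        have hcolT : ∀ x ∈ List.range (g.getD 0 []).length,
            (decide ((if 2 * x < (g.getD 0 []).length then 0 else (g.getD 0 []).length - 1) = 0))
              = decide (x < ((g.getD 0 []).length + 1) / 2) := by
          intro x hx
          simp only [List.mem_range] at hx
          split <;> (rw [decide_eq_decide]; omega)
        rw [pvFilter_RM g.length (g.getD 0 []).length (fun x => decide ((if 2 * x < g.length then 0 else g.length - 1) = g.length - 1)) (fun x => decide ((if 2 * x < (g.getD 0 []).length then 0 else (g.getD 0 []).length - 1) = 0)), List.filter_congr hrowB, List.filter_congr hcolT,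
          pvFilter_range_ge _ _ (by omega), pvFilter_range_lt _ _ (by omega)]
        have hq : pvQuad ((g.length + 1) / 2) g.length 0 (((g.getD 0 []).length + 1) / 2)
            = (List.range' ((g.length + 1) / 2) (g.length - (g.length + 1) / 2)).flatMap
                (fun r => (List.range' 0 (((g.getD 0 []).length + 1) / 2)).map
                  (fun c => (r, c))) := by
          simp [pvQuad]
        rw [← hq, ← pvLastNonzero_eq]
        rw [pvGet2_write_skip sh3 (by omega) (by omega) _ (by
            by_cases h1 : (g.getD 0 []).length = 1
            · exact Or.inr (pvLastNonzero_none_cols g _ _ (by omega))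
            · exact Or.inl (by omega)),
          pvGet2_write_hit sh2 (by omega) (by omega) _ ⟨rfl, rfl⟩,
          pvGet2_write_skip sh1 (by omega) (by omega) _ (Or.inl (by omega)),
          pvGet2_write_skip sh0 (by omega) (by omega) _ (Or.inl (by omega)), pvGet2_out0]
      · by_cases hcC : c' = (g.getD 0 []).length - 1
        · subst hcC
          -- bottom-right corner (R ≥ 2, C ≥ 2)
          have hcolB : ∀ x ∈ List.range (g.getD 0 []).length,
              (decide ((if 2 * x < (g.getD 0 []).length then 0 else (g.getD 0 []).length - 1)
                  = (g.getD 0 []).length - 1))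
                = decide (((g.getD 0 []).length + 1) / 2 ≤ x) := by
            intro x hx
            simp only [List.mem_range] at hx
            split <;> (rw [decide_eq_decide]; omega)
          rw [pvFilter_RM g.length (g.getD 0 []).length (fun x => decide ((if 2 * x < g.length then 0 else g.length - 1) = g.length - 1)) (fun x => decide ((if 2 * x < (g.getD 0 []).length then 0 else (g.getD 0 []).length - 1) = (g.getD 0 []).length - 1)), List.filter_congr hrowB, List.filter_congr hcolB,
            pvFilter_range_ge _ _ (by omega), pvFilter_range_ge _ _ (by omega)]
          have hq : pvQuad ((g.length + 1) / 2) g.length (((g.getD 0 []).length + 1) / 2)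
                (g.getD 0 []).length
              = (List.range' ((g.length + 1) / 2) (g.length - (g.length + 1) / 2)).flatMap
                  (fun r => (List.range' (((g.getD 0 []).length + 1) / 2)
                    ((g.getD 0 []).length - ((g.getD 0 []).length + 1) / 2)).map
                      (fun c => (r, c))) := by
            simp [pvQuad]
          rw [← hq, ← pvLastNonzero_eq]
          rw [pvGet2_write_hit sh3 (by omega) (by omega) _ ⟨rfl, rfl⟩,
            pvGet2_write_skip sh2 (by omega) (by omega) _ (Or.inl (by omega)),
            pvGet2_write_skip sh1 (by omega) (by omega) _ (Or.inl (by omega)),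
            pvGet2_write_skip sh0 (by omega) (by omega) _ (Or.inl (by omega)), pvGet2_out0]
        · -- c' is not a corner column
          rw [List.filter_eq_nil_iff.mpr (by
            intro p hp
            simp only [Bool.and_eq_true, decide_eq_true_eq]
            rintro ⟨h1, h2⟩
            split at h2 <;> omega)]
          rw [pvGet2_write_skip sh3 (by omega) (by omega) _ (Or.inl (by omega)),
            pvGet2_write_skip sh2 (by omega) (by omega) _ (Or.inl (by omega)),
            pvGet2_write_skip sh1 (by omega) (by omega) _ (Or.inl (by omega)),
            pvGet2_write_skip sh0 (by omega) (by omega) _ (Or.inl (by omega)), pvGet2_out0]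
          rfl
    · -- r' is not a corner row: both sides are 0
      rw [List.filter_eq_nil_iff.mpr (by
        intro p hp
        simp only [Bool.and_eq_true, decide_eq_true_eq]
        rintro ⟨h1, h2⟩
        split at h1 <;> omega)]
      rw [pvGet2_write_skip sh3 (by omega) (by omega) _ (Or.inl (by omega)),
        pvGet2_write_skip sh2 (by omega) (by omega) _ (Or.inl (by omega)),
        pvGet2_write_skip sh1 (by omega) (by omega) _ (Or.inl (by omega)),
        pvGet2_write_skip sh0 (by omega) (by omega) _ (Or.inl (by omega)), pvGet2_out0]
      rfl

-- ===== VERDICT (by name: the statement is the Claim_ definition above) =====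
theorem g_move_to_corners_spec : Claim_equal_g_move_to_corners := by
  intro g _ _; unfold Spec_g_move_to_corners; exact pvMain g
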